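-- pv_equiv track=rewrite | github.com/NobuyukiInoue/LeetCode | Problems/1900_1999/1979_Find_Greatest_Common_Divisor_of_Array/Project_Python3/Find_Greatest_Common_Divisor_of_Array.py | findGCD2
-- ===== SOURCE A (Python) =====
-- from typing import List, Dict, Tuple
--
-- def findGCD2(nums: List[int]) -> int:
--     # 79ms
--     v_min, v_max = nums[0], nums[0]
--     for _, n in enumerate(nums):
--         v_min = min(v_min, n)
--         v_max = max(v_max, n)
--     ans = 1
--     if v_min == v_max:
--         return v_min
--     for i in range(1, v_max//2 + 1):
--         if v_max % i == 0 and v_min % i == 0: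
--             ans = i
--     return ans
-- ===== SOURCE B (Python) =====
-- def findGCD2(nums):
--     lo, hi = min(nums), max(nums)
--     if lo == hi:
--         return lo
--     a, b = abs(hi), abs(lo)
--     while b:
--         a, b = b, a % b
--     return a
-- ===== Notes on version B (the rewrite author's own statement) =====
-- stated objective: faster
-- what changed: Replaces A's O(v_max) trial-division scan that keeps the last common divisor up to v_max//2 with the Euclidean algorithm on |max| and |min| (and the enumerate min/max loop with the built-ins min/max).
-- intended difference: On nonempty lists whose min and max differ and where either max <= 1 with gcd(min,max) != 1 or max >= 2 divides min, A's scan capped at max//2 returns 1 or a proper divisor of max instead of the GCD of min and max, which B returns as intended. — e.g. on findGCD2([0, 4]): A returns 2, B returns 4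
import Mathlib
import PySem

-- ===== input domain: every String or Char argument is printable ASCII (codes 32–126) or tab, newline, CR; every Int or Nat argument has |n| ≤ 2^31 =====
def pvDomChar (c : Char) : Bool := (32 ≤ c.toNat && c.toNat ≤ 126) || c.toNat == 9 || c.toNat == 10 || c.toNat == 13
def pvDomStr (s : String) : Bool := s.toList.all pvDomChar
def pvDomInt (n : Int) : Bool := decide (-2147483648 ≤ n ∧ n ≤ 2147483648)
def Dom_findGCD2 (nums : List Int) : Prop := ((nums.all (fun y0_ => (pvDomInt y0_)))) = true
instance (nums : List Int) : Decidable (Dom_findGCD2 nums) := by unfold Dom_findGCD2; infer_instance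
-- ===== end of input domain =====

-- B replaces A's O(v_max) trial-division scan by the Euclidean algorithm (and the enumerate
-- loop by built-in min/max); return values agree outside D_findGCD2, where B returns the true gcd.

-- ===== PORT A =====
def findGCD2 (nums : List Int) : Int :=
  match PySem.List.pyGet? nums 0 with
  | none => 0  -- nums[0] raises IndexError on []; excluded by Pre_findGCD2
  | some x0 =>
    let mm := (PySem.List.enumerate nums 0).foldl
      (fun (p : Int × Int) (e : Int × Int) => (min p.1 e.2, max p.2 e.2)) (x0, x0)
    if mm.1 = mm.2 then mm.1
    else
      (PySem.List.pyRange 1 (PySem.Int.floordiv mm.2 2 + 1) 1).foldl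
        (fun ans i => if PySem.Int.mod mm.2 i = 0 ∧ PySem.Int.mod mm.1 i = 0 then i else ans) 1

-- ===== PORT B =====
-- 'while b: a, b = b, a % b'; the fuel |b|+1 only makes the loop total (|b| strictly decreases)
def euclidGo : Nat → Int → Int → Int
  | 0, a, _ => a
  | fuel+1, a, b => if b = 0 then a else euclidGo fuel b (PySem.Int.mod a b)

def findGCD2_alt (nums : List Int) : Int :=
  match PySem.List.min? nums (fun y => y), PySem.List.max? nums (fun y => y) with
  | some lo, some hi => if lo = hi then lo else euclidGo (lo.natAbs + 1) |hi| |lo|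
  | _, _ => 0  -- min()/max() of an empty list raise ValueError; excluded by Pre_findGCD2

-- ===== PRECONDITION & SPEC =====
-- Pre_ excludes only the empty list, on which A raises IndexError (and B raises ValueError).
def Pre_findGCD2 (nums : List Int) : Prop := nums ≠ []
instance (nums : List Int) : Decidable (Pre_findGCD2 nums) := by unfold Pre_findGCD2; infer_instance
def pvWitness_findGCD2 : List Int := [4, 6]

-- On nonempty lists whose min and max differ and where either max ≤ 1 with gcd(min,max) ≠ 1 or
-- max ≥ 2 divides min, A's trial scan capped at max//2 returns 1 or a proper divisor of max
-- instead of the GCD of min and max, which B (the intended value) returns.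
def D_findGCD2 (nums : List Int) : Prop :=
  nums ≠ [] ∧ nums.min?.getD 0 ≠ nums.max?.getD 0 ∧
    ((nums.max?.getD 0 ≤ 1 ∧ (nums.min?.getD 0).gcd (nums.max?.getD 0) ≠ 1) ∨
     (2 ≤ nums.max?.getD 0 ∧ nums.max?.getD 0 ∣ nums.min?.getD 0))
instance (nums : List Int) : Decidable (D_findGCD2 nums) := by unfold D_findGCD2; infer_instance

def Spec_findGCD2 (nums : List Int) (out : Int) : Prop := ¬ D_findGCD2 nums → out = findGCD2_alt nums
instance (nums : List Int) (out : Int) : Decidable (Spec_findGCD2 nums out) := by unfold Spec_findGCD2; infer_instance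

def pvDiffWitness_findGCD2 : List Int := [0, 4]
def pvDiffWitnessOut_findGCD2 : Int × Int := (2, 4)

-- ===== CLAIM (what is proved, stated in full; the proofs are below) =====
def Claim_unchanged_findGCD2 : Prop := ∀ (nums : List Int), Dom_findGCD2 nums → Pre_findGCD2 nums → Spec_findGCD2 nums (findGCD2 nums)
def Claim_changed_findGCD2 : Prop := Dom_findGCD2 (pvDiffWitness_findGCD2) ∧ Pre_findGCD2 (pvDiffWitness_findGCD2) ∧ D_findGCD2 (pvDiffWitness_findGCD2) ∧ findGCD2 (pvDiffWitness_findGCD2) = pvDiffWitnessOut_findGCD2.1 ∧ findGCD2_alt (pvDiffWitness_findGCD2) = pvDiffWitnessOut_findGCD2.2 ∧ pvDiffWitnessOut_findGCD2.1 ≠ pvDiffWitnessOut_findGCD2.2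
def Claim_exact_findGCD2 : Prop := ∀ (nums : List Int), Dom_findGCD2 nums → Pre_findGCD2 nums → D_findGCD2 nums → findGCD2 nums ≠ findGCD2_alt nums

-- ===== LEMMAS AND PROOFS =====

-- A's enumerate loop is the running min/max pair
lemma enumFold (xs : List Int) (s : Int) (p : Int × Int) :
    (PySem.List.enumerate xs s).foldl
      (fun (p : Int × Int) (e : Int × Int) => (min p.1 e.2, max p.2 e.2)) p
    = (xs.foldl min p.1, xs.foldl max p.2) := by
  induction xs generalizing s p with
  | nil => simp [PySem.List.enumerate_nil]
  | cons x t ih => simp [PySem.List.enumerate_cons, ih]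

-- 'keep the last satisfying element' loop: no satisfying element → unchanged
lemma foldl_if_none (P : Int → Prop) [DecidablePred P] (l : List Int) (s : Int)
    (h : ∀ i ∈ l, ¬ P i) :
    l.foldl (fun ans i => if P i then i else ans) s = s := by
  induction l generalizing s with
  | nil => rfl
  | cons x t ih =>
    have hx := h x (by simp)
    simp only [List.foldl_cons, if_neg hx]
    exact ih s (fun i hi => h i (by simp [hi]))

-- 'keep the last satisfying element' loop: bounded by a bound on the state and the elements
lemma foldl_if_le (P : Int → Prop) [DecidablePred P] (m : Int) (l : List Int) (s : Int)
    (hs : s ≤ m) (h : ∀ i ∈ l, i ≤ m) :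
    l.foldl (fun ans i => if P i then i else ans) s ≤ m := by
  induction l generalizing s with
  | nil => exact hs
  | cons x t ih =>
    simp only [List.foldl_cons]
    refine ih (if P x then x else s) ?_ (fun i hi => h i (by simp [hi]))
    by_cases hP : P x
    · simpa [hP] using h x (by simp)
    · simpa [hP] using hs

-- the ported while-loop computes the gcd on nonnegative arguments (fuel |b|+1 suffices)
lemma euclidGo_gcd (fuel : Nat) (a b : Int) (ha : 0 ≤ a) (hb : 0 ≤ b)
    (hf : b.natAbs < fuel) : euclidGo fuel a b = (Int.gcd a b : Int) := by
  induction fuel generalizing a b with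
  | zero => omega
  | succ n ih =>
    by_cases h0 : b = 0
    · simp [euclidGo, h0, Int.natAbs_of_nonneg ha]
    · have hbpos : 0 < b := lt_of_le_of_ne hb (Ne.symm h0)
      have hmod : PySem.Int.mod a b = a % b := PySem.Int.mod_eq_emod_of_pos hbpos
      have hnn : 0 ≤ a % b := Int.emod_nonneg a h0
      have hlt : a % b < b := Int.emod_lt_of_pos a hbpos
      have : euclidGo (n+1) a b = euclidGo n b (PySem.Int.mod a b) := by
        simp [euclidGo, h0]
      rw [this, hmod, ih b (a % b) hb hnn (by omega)]
      rw [Int.gcd_comm, Int.gcd_emod]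

lemma gcd_abs (lo hi : Int) : Int.gcd |hi| |lo| = Int.gcd lo hi := by
  simp [Int.gcd, Int.natAbs_abs, Nat.gcd_comm]

-- B's euclid call on |max|, |min| is the gcd of min and max
lemma euclid_abs_eq_gcd (lo hi : Int) :
    euclidGo (lo.natAbs + 1) |hi| |lo| = (Int.gcd lo hi : Int) := by
  rw [euclidGo_gcd _ _ _ (abs_nonneg hi) (abs_nonneg lo) (by simp [Int.natAbs_abs]),
      gcd_abs]

-- A's trial-division loop returns the gcd when 2 ≤ hi and hi does not divide lo
lemma trial_eq_gcd (lo hi : Int) (h2 : 2 ≤ hi) (hnd : ¬ hi ∣ lo) :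
    (PySem.List.pyRange 1 (PySem.Int.floordiv hi 2 + 1) 1).foldl
      (fun ans i => if PySem.Int.mod hi i = 0 ∧ PySem.Int.mod lo i = 0 then i else ans) 1
    = (Int.gcd lo hi : Int) := by
  set g : Int := (Int.gcd lo hi : Int) with hg
  have hgdl : g ∣ lo := Int.gcd_dvd_left lo hi
  have hgdh : g ∣ hi := Int.gcd_dvd_right lo hi
  have hg0 : 0 < g := by
    rcases lt_or_eq_of_le (Int.natCast_nonneg (Int.gcd lo hi)) with h | h
    · exact h
    · exfalso
      have : Int.gcd lo hi = 0 := by exact_mod_cast h.symm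
      have := Int.gcd_eq_zero_iff.mp this
      omega
  have hglt : g < hi := by
    have hle : g ≤ hi := Int.le_of_dvd (by omega) hgdh
    rcases lt_or_eq_of_le hle with h | h
    · exact h
    · exact absurd (h ▸ hgdl) hnd
  have h2g : g * 2 ≤ hi := by
    obtain ⟨k, hk⟩ := hgdh
    have hk2 : 2 ≤ k := by nlinarith
    nlinarith
  have hgm : g ≤ PySem.Int.floordiv hi 2 :=
    (PySem.Int.le_floordiv_iff_mul_le (by omega)).mpr h2g
  rw [PySem.List.pyRange_one_append 1 (g + 1) (PySem.Int.floordiv hi 2 + 1)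
        (by omega) (by omega),
      PySem.List.pyRange_one_succ_right (by omega : (1:Int) ≤ g),
      List.foldl_append, List.foldl_append]
  have hPg : PySem.Int.mod hi g = 0 ∧ PySem.Int.mod lo g = 0 :=
    ⟨(PySem.Int.mod_eq_zero_iff_dvd hi g).mpr hgdh,
     (PySem.Int.mod_eq_zero_iff_dvd lo g).mpr hgdl⟩
  simp only [List.foldl_cons, List.foldl_nil, if_pos hPg]
  refine foldl_if_none _ _ g (fun i hi' hP => ?_)
  have hmem := (PySem.List.mem_pyRange_one).mp hi'
  have hidh : i ∣ hi := (PySem.Int.mod_eq_zero_iff_dvd hi i).mp hP.1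
  have hidl : i ∣ lo := (PySem.Int.mod_eq_zero_iff_dvd lo i).mp hP.2
  have : i ∣ g := Int.dvd_coe_gcd hidl hidh
  have := Int.le_of_dvd hg0 this
  omega

-- A's trial-division loop is empty when hi ≤ 1
lemma trial_empty (hi : Int) (h1 : hi ≤ 1) :
    PySem.List.pyRange 1 (PySem.Int.floordiv hi 2 + 1) 1 = ([] : List Int) := by
  have : PySem.Int.floordiv hi 2 < 1 :=
    (PySem.Int.floordiv_lt_iff_lt_mul (by omega)).mpr (by omega)
  exact PySem.List.pyRange_one_eq_nil (by omega)

-- both ports, unfolded on a cons cell, in terms of lo := t.foldl min x, hi := t.foldl max x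
lemma A_cons (x : Int) (t : List Int) :
    findGCD2 (x :: t)
    = (if t.foldl min x = t.foldl max x then t.foldl min x
       else (PySem.List.pyRange 1 (PySem.Int.floordiv (t.foldl max x) 2 + 1) 1).foldl
        (fun ans i => if PySem.Int.mod (t.foldl max x) i = 0 ∧ PySem.Int.mod (t.foldl min x) i = 0
          then i else ans) 1) := by
  have hget : PySem.List.pyGet? (x :: t) 0 = some x := by
    simp [PySem.List.pyGet?, PySem.List.pyIdx?]
  simp only [findGCD2, hget, enumFold, List.foldl_cons, min_self, max_self]

lemma B_cons (x : Int) (t : List Int) :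
    findGCD2_alt (x :: t)
    = (if t.foldl min x = t.foldl max x then t.foldl min x
       else euclidGo ((t.foldl min x).natAbs + 1) |t.foldl max x| |t.foldl min x|) := by
  simp only [findGCD2_alt, PySem.List.min?_id_cons, PySem.List.max?_id_cons]

lemma dmin_cons (x : Int) (t : List Int) : (x :: t).min?.getD 0 = t.foldl min x := by
  rw [List.min?_cons']; rfl
lemma dmax_cons (x : Int) (t : List Int) : (x :: t).max?.getD 0 = t.foldl max x := by
  rw [List.max?_cons']; rfl

-- ===== VERDICT (by name: the statement is the Claim_ definition above) =====
theorem findGCD2_spec : Claim_unchanged_findGCD2 := by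
  intro nums _ hpre hnD
  rcases nums with _ | ⟨x, t⟩
  · exact absurd rfl hpre
  rw [A_cons, B_cons]
  set lo := t.foldl min x with hlo
  set hi := t.foldl max x with hhi
  by_cases heq : lo = hi
  · simp [heq]
  rw [if_neg heq, if_neg heq]
  rw [euclid_abs_eq_gcd]
  simp only [D_findGCD2, dmin_cons, dmax_cons, ← hlo, ← hhi] at hnD
  push Not at hnD
  by_cases h1 : hi ≤ 1
  · have hgcd1 : Int.gcd lo hi = 1 := (hnD (by simp) heq).1 h1
    rw [trial_empty hi h1, hgcd1]
    rfl
  · have h2 : 2 ≤ hi := by omega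
    have hnd : ¬ hi ∣ lo := (hnD (by simp) heq).2 h2
    exact trial_eq_gcd lo hi h2 hnd

theorem findGCD2_changed : Claim_changed_findGCD2 := by
  unfold Claim_changed_findGCD2; decide

theorem findGCD2_tight : Claim_exact_findGCD2 := by
  intro nums _ _ hD
  rcases nums with _ | ⟨x, t⟩
  · exact absurd rfl hD.1
  rw [A_cons, B_cons]
  set lo := t.foldl min x with hlo
  set hi := t.foldl max x with hhi
  obtain ⟨-, hne, hcase⟩ := hD
  rw [dmin_cons, dmax_cons] at hne
  rw [if_neg hne, if_neg hne, euclid_abs_eq_gcd]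
  rcases hcase with ⟨h1, hg1⟩ | ⟨h2, hdvd⟩
  · rw [dmax_cons] at h1; rw [dmin_cons, dmax_cons] at hg1
    rw [trial_empty hi h1]
    simp only [List.foldl_nil]
    intro h
    exact hg1 (by exact_mod_cast h.symm)
  · rw [dmax_cons] at h2; rw [dmin_cons, dmax_cons] at hdvd
    have hB : (Int.gcd lo hi : Int) = hi := by
      have : Int.gcd lo hi = hi.natAbs := Nat.gcd_eq_right (Int.natAbs_dvd_natAbs.mpr hdvd)
      rw [this, ← Int.abs_eq_natAbs, abs_of_nonneg (by omega)]
    have hm : PySem.Int.floordiv hi 2 < hi :=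
      (PySem.Int.floordiv_lt_iff_lt_mul (by omega)).mpr (by omega)
    have h1m : (1:Int) ≤ PySem.Int.floordiv hi 2 :=
      (PySem.Int.le_floordiv_iff_mul_le (by omega)).mpr (by omega)
    have hA : (PySem.List.pyRange 1 (PySem.Int.floordiv hi 2 + 1) 1).foldl
        (fun ans i => if PySem.Int.mod hi i = 0 ∧ PySem.Int.mod lo i = 0 then i else ans) 1
        ≤ PySem.Int.floordiv hi 2 :=
      foldl_if_le _ _ _ 1 h1m (fun i hi' => by
        have := (PySem.List.mem_pyRange_one).mp hi'
        omega)
    intro h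
    rw [hB] at h
    omega
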